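-- pv_equiv track=rewrite | github.com/0xAmir/NanoPot | Commands.py | coms
-- ===== SOURCE A (Python) =====
-- def coms(com):
--
--
--
--     while True:
--
--
--         if "help" in com or "?" in com:
--             return("\t ls \t status \t reboot \t pwd \t whoami\n\t ping\t cd\t\t passwd\t\tversion   exit\n")
--
--         elif "ls" in com:
--             return(".\n..\n")
--
--         elif "status" in com:
--             return("[+]ONLINE\nUPLOAD OK\nDOWNLOAD OK\n")
--
--         elif "reboot" in com:
--             return("\nRebooting...\n")
--
--         elif "pwd" in com:
--             return "~/home\n"
--
--         elif "whoami" in com: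
--             return "admin\n"
--
--         elif "ping" in com:
--             return("Not allowed.\n")
--
--         elif "cd" in com:
--             return("Not allowed.\n")
--
--         elif "passwd" in com:
--             return("Not allowed.\n")
--
--         elif "version" in com:
--             return("hg8240 3.5.1\n")
--
--         elif "exit" in com:
--             return("BYE\n")
--
--         elif "ping" in com:
--             return("Not Allowed.\n")
--
--
--
--         else:
--             return com + ": command not found\n"
-- ===== SOURCE B (Python) =====
-- HELP = "\t ls \t status \t reboot \t pwd \t whoami\n\t ping\t cd\t\t passwd\t\tversion   exit\n"
--
-- TABLE = [
--     ("help", HELP),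
--     ("?", HELP),
--     ("ls", ".\n..\n"),
--     ("status", "[+]ONLINE\nUPLOAD OK\nDOWNLOAD OK\n"),
--     ("reboot", "\nRebooting...\n"),
--     ("pwd", "~/home\n"),
--     ("whoami", "admin\n"),
--     ("ping", "Not allowed.\n"),
--     ("cd", "Not allowed.\n"),
--     ("passwd", "Not allowed.\n"),
--     ("version", "hg8240 3.5.1\n"),
--     ("exit", "BYE\n"),
-- ]
--
-- def coms(com):
--     # Single left-to-right scan over the command: at each position, prefix-match
--     # the keywords and keep the smallest (highest-priority) table index seen.
--     n = len(TABLE)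
--     best = n
--     for i in range(len(com)):
--         for j in range(best):
--             if com.startswith(TABLE[j][0], i):
--                 best = j
--                 break
--     return TABLE[best][1] if best < n else com + ": command not found\n"
-- ===== Notes on version B (the rewrite author's own statement) =====
-- stated objective: alternative
-- what changed: Instead of testing each keyword for substring containment in branch order, B makes a single left-to-right scan over the command's positions, prefix-matching the ordered keyword table at each position while shrinking a best-priority bound, and returns the response at the smallest matched index (fallback if none).
import Mathlib
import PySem

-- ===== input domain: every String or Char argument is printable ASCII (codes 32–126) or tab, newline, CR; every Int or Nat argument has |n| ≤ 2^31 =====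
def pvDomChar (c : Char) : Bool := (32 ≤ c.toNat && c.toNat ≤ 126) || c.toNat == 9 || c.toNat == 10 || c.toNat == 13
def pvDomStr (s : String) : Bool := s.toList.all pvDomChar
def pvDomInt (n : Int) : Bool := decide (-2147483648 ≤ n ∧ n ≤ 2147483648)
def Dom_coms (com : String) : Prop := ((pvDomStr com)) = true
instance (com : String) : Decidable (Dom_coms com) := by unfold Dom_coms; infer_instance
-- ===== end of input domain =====

-- B replaces A's ordered substring-test cascade by a single left-to-right scan over
-- the command's positions, prefix-matching the keyword table at each position and
-- keeping the smallest (highest-priority) index found (alternative decomposition).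

-- ===== PORT A =====
def coms (com : String) : String :=
  -- the Python 'while True' always returns on its first iteration
  if PySem.Str.isIn "help" com || PySem.Str.isIn "?" com then
    "\t ls \t status \t reboot \t pwd \t whoami\n\t ping\t cd\t\t passwd\t\tversion   exit\n"
  else if PySem.Str.isIn "ls" com then ".\n..\n"
  else if PySem.Str.isIn "status" com then "[+]ONLINE\nUPLOAD OK\nDOWNLOAD OK\n"
  else if PySem.Str.isIn "reboot" com then "\nRebooting...\n"
  else if PySem.Str.isIn "pwd" com then "~/home\n"
  else if PySem.Str.isIn "whoami" com then "admin\n"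
  else if PySem.Str.isIn "ping" com then "Not allowed.\n"
  else if PySem.Str.isIn "cd" com then "Not allowed.\n"
  else if PySem.Str.isIn "passwd" com then "Not allowed.\n"
  else if PySem.Str.isIn "version" com then "hg8240 3.5.1\n"
  else if PySem.Str.isIn "exit" com then "BYE\n"
  else if PySem.Str.isIn "ping" com then "Not Allowed.\n"  -- unreachable duplicate branch, kept literally
  else com ++ ": command not found\n"

-- ===== PORT B =====
def comsHelp : String := "\t ls \t status \t reboot \t pwd \t whoami\n\t ping\t cd\t\t passwd\t\tversion   exit\n"

def comsTable : List (String × String) :=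
  [ ("help", comsHelp), ("?", comsHelp),
    ("ls", ".\n..\n"),
    ("status", "[+]ONLINE\nUPLOAD OK\nDOWNLOAD OK\n"),
    ("reboot", "\nRebooting...\n"),
    ("pwd", "~/home\n"),
    ("whoami", "admin\n"),
    ("ping", "Not allowed.\n"),
    ("cd", "Not allowed.\n"),
    ("passwd", "Not allowed.\n"),
    ("version", "hg8240 3.5.1\n"),
    ("exit", "BYE\n") ]

-- keyword of table entry j, as a character list
def comsKw (j : Nat) : List Char := (comsTable.getD j ("", "")).1.toList

-- inner loop of Source B: 'for j in range(best): if match: best = j; break'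
def comsStep (q : Nat → Bool) (b : Nat) : Nat :=
  match (List.range b).find? q with
  | some j => j
  | none => b

def coms_alt (com : String) : String :=
  let s := com.toList
  let n := comsTable.length
  -- outer loop of Source B over the positions of com; com.startswith(kw, i) for
  -- 0 ≤ i < len(com) is exactly 'kw is a prefix of com[i:]'
  let best := (List.range s.length).foldl
    (fun b i => comsStep (fun j => PySem.Chars.startswith (s.drop i) (comsKw j)) b) n
  if best < n then (comsTable.getD best ("", "")).2 else com ++ ": command not found\n"

-- ===== PRECONDITION & SPEC =====
def Spec_coms (com : String) (out : String) : Prop := out = coms_alt com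
instance (com : String) (out : String) : Decidable (Spec_coms com out) := by unfold Spec_coms; infer_instance

-- ===== CLAIM (what is proved, stated in full; the proofs are below) =====
def Claim_equal_coms : Prop := ∀ (com : String), Dom_coms com → Spec_coms com (coms com)

-- ===== LEMMAS AND PROOFS =====

theorem comsStep_le (q : Nat → Bool) (b : Nat) : comsStep q b ≤ b := by
  unfold comsStep
  cases h : (List.range b).find? q with
  | none => exact Nat.le_refl b
  | some j => exact Nat.le_of_lt (List.mem_range.1 (List.mem_of_find?_eq_some h))

theorem comsStep_le_of (q : Nat → Bool) (b j : Nat) (hq : q j = true) :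
    comsStep q b ≤ j := by
  rcases Nat.lt_or_ge j b with hj | hj
  · -- range b = range (j+1) ++ tail; q holds somewhere in range (j+1)
    unfold comsStep
    have hsplit : List.range b = List.range (j+1) ++ (List.range (b - (j+1))).map (j+1+·) := by
      rw [← List.range_add]; congr 1; omega
    rw [hsplit, List.find?_append]
    have hsome : ((List.range (j+1)).find? q).isSome := by
      rw [List.find?_isSome]
      exact ⟨j, List.mem_range.2 (Nat.lt_succ_self j), hq⟩
    cases h : (List.range (j+1)).find? q with
    | none => rw [h] at hsome; simp at hsome
    | some j' =>
      simp only [Option.some_or]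
      exact Nat.lt_succ_iff.1 (List.mem_range.1 (List.mem_of_find?_eq_some h))
  · exact le_trans (comsStep_le q b) hj

theorem comsStep_sat (q : Nat → Bool) (b : Nat) (h : comsStep q b < b) :
    q (comsStep q b) = true := by
  cases hf : (List.range b).find? q with
  | none =>
    have hb : comsStep q b = b := by unfold comsStep; rw [hf]
    omega
  | some j =>
    have hb : comsStep q b = j := by unfold comsStep; rw [hf]
    rw [hb]; exact List.find?_some hf

theorem comsRun_le (F : Nat → Nat → Bool) (l : List Nat) (b : Nat) :
    l.foldl (fun b i => comsStep (fun j => F j i) b) b ≤ b := by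
  induction l generalizing b with
  | nil => exact Nat.le_refl b
  | cons i l ih =>
    exact le_trans (ih (comsStep (fun j => F j i) b)) (comsStep_le _ b)

theorem comsRun_le_of (F : Nat → Nat → Bool) (l : List Nat) (b i j : Nat)
    (hF : F j i = true) (hi : i ∈ l) :
    l.foldl (fun b i => comsStep (fun j => F j i) b) b ≤ j := by
  induction l generalizing b with
  | nil => cases hi
  | cons i' l ih =>
    rcases List.mem_cons.1 hi with rfl | hi'
    · exact le_trans (comsRun_le F l _) (comsStep_le_of _ b j hF)
    · exact ih _ hi'

theorem comsRun_sat (F : Nat → Nat → Bool) (l : List Nat) (b : Nat)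
    (h : l.foldl (fun b i => comsStep (fun j => F j i) b) b < b) :
    ∃ i ∈ l, F (l.foldl (fun b i => comsStep (fun j => F j i) b) b) i = true := by
  induction l generalizing b with
  | nil => simp at h
  | cons i l ih =>
    simp only [List.foldl_cons] at *
    by_cases hlt : l.foldl (fun b i => comsStep (fun j => F j i) b)
        (comsStep (fun j => F j i) b) < comsStep (fun j => F j i) b
    · obtain ⟨i', hi', hq⟩ := ih _ hlt
      exact ⟨i', List.mem_cons_of_mem _ hi', hq⟩
    · have heq : l.foldl (fun b i => comsStep (fun j => F j i) b)
          (comsStep (fun j => F j i) b) = comsStep (fun j => F j i) b := by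
        have := comsRun_le F l (comsStep (fun j => F j i) b)
        omega
      rw [heq] at h ⊢
      exact ⟨i, List.mem_cons_self, comsStep_sat _ _ h⟩

-- keyword j occurs somewhere in s
def comsGood (s : List Char) (j : Nat) : Prop := PySem.Chars.isIn (comsKw j) s = true

theorem comsKw_ne_nil : ∀ j < 12, comsKw j ≠ [] := by decide

theorem comsGood_iff (s : List Char) (j : Nat) (hj : j < 12) :
    comsGood s j ↔ ∃ i ∈ List.range s.length,
      PySem.Chars.startswith (s.drop i) (comsKw j) = true := by
  constructor
  · intro hg
    obtain ⟨i, hpre⟩ := (PySem.Chars.exists_prefix_drop_iff_isIn (comsKw j) s).2 hg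
    have hne : s.drop i ≠ [] := by
      intro hnil
      exact comsKw_ne_nil j hj (List.prefix_nil.1 (hnil ▸ hpre))
    have hi : i < s.length := by
      by_contra hle
      exact hne (List.drop_eq_nil_of_le (by omega))
    exact ⟨i, List.mem_range.2 hi, (PySem.Chars.startswith_iff _ _).2 hpre⟩
  · rintro ⟨i, _, hq⟩
    exact (PySem.Chars.exists_prefix_drop_iff_isIn (comsKw j) s).1
      ⟨i, (PySem.Chars.startswith_iff _ _).1 hq⟩

-- characterisation of B's accumulator: it ends at the first matching table index (12 if none)
theorem comsBest_spec (s : List Char) :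
    (List.range s.length).foldl
      (fun b i => comsStep (fun j => PySem.Chars.startswith (s.drop i) (comsKw j)) b) 12 ≤ 12 ∧
    ((List.range s.length).foldl
      (fun b i => comsStep (fun j => PySem.Chars.startswith (s.drop i) (comsKw j)) b) 12 < 12 →
      comsGood s ((List.range s.length).foldl
        (fun b i => comsStep (fun j => PySem.Chars.startswith (s.drop i) (comsKw j)) b) 12)) ∧
    (∀ j < 12, comsGood s j → (List.range s.length).foldl
      (fun b i => comsStep (fun j => PySem.Chars.startswith (s.drop i) (comsKw j)) b) 12 ≤ j) := by
  refine ⟨comsRun_le _ _ 12, ?_, ?_⟩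
  · intro hlt
    obtain ⟨i, hi, hq⟩ := comsRun_sat (fun j i => PySem.Chars.startswith (s.drop i) (comsKw j)) _ 12 hlt
    exact (comsGood_iff s _ hlt).2 ⟨i, hi, hq⟩
  · intro j hj hg
    obtain ⟨i, hi, hq⟩ := (comsGood_iff s j hj).1 hg
    exact comsRun_le_of (fun j i => PySem.Chars.startswith (s.drop i) (comsKw j)) _ 12 i j hq hi

theorem comsGood_eq (com : String) (j : Nat) (kw : String)
    (hkw : (comsTable.getD j ("", "")).1 = kw) :
    comsGood com.toList j ↔ PySem.Str.isIn kw com = true := by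
  subst hkw
  simp [comsGood, comsKw, PySem.Str.isIn_eq]

theorem coms_eq_table (com : String) (best : Nat)
    (hle : best ≤ 12) (hsat : best < 12 → comsGood com.toList best)
    (hmin : ∀ j < 12, comsGood com.toList j → best ≤ j) :
    coms com = if best < 12 then (comsTable.getD best ("", "")).2
      else com ++ ": command not found\n" := by
  by_cases h1 : PySem.Str.isIn "help" com = true
  · have hb : best = 0 := by
      have hlek := hmin 0 (by omega) ((comsGood_eq com 0 "help" rfl).2 h1)
      omega
    subst hb
    clear hsat hmin hle
    simp_all [coms, comsHelp, comsTable]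
  by_cases h2 : PySem.Str.isIn "?" com = true
  · have hb : best = 1 := by
      have hlek := hmin 1 (by omega) ((comsGood_eq com 1 "?" rfl).2 h2)
      by_contra hne
      have hg := hsat (by omega)
      have hltk : best < 1 := by omega
      interval_cases best
      · exact h1 ((comsGood_eq com 0 "help" rfl).1 hg)
    subst hb
    clear hsat hmin hle
    simp_all [coms, comsHelp, comsTable]
  by_cases h3 : PySem.Str.isIn "ls" com = true
  · have hb : best = 2 := by
      have hlek := hmin 2 (by omega) ((comsGood_eq com 2 "ls" rfl).2 h3)
      by_contra hne
      have hg := hsat (by omega)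
      have hltk : best < 2 := by omega
      interval_cases best
      · exact h1 ((comsGood_eq com 0 "help" rfl).1 hg)
      · exact h2 ((comsGood_eq com 1 "?" rfl).1 hg)
    subst hb
    clear hsat hmin hle
    simp_all [coms, comsHelp, comsTable]
  by_cases h4 : PySem.Str.isIn "status" com = true
  · have hb : best = 3 := by
      have hlek := hmin 3 (by omega) ((comsGood_eq com 3 "status" rfl).2 h4)
      by_contra hne
      have hg := hsat (by omega)
      have hltk : best < 3 := by omega
      interval_cases best
      · exact h1 ((comsGood_eq com 0 "help" rfl).1 hg)
      · exact h2 ((comsGood_eq com 1 "?" rfl).1 hg)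
      · exact h3 ((comsGood_eq com 2 "ls" rfl).1 hg)
    subst hb
    clear hsat hmin hle
    simp_all [coms, comsHelp, comsTable]
  by_cases h5 : PySem.Str.isIn "reboot" com = true
  · have hb : best = 4 := by
      have hlek := hmin 4 (by omega) ((comsGood_eq com 4 "reboot" rfl).2 h5)
      by_contra hne
      have hg := hsat (by omega)
      have hltk : best < 4 := by omega
      interval_cases best
      · exact h1 ((comsGood_eq com 0 "help" rfl).1 hg)
      · exact h2 ((comsGood_eq com 1 "?" rfl).1 hg)
      · exact h3 ((comsGood_eq com 2 "ls" rfl).1 hg)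
      · exact h4 ((comsGood_eq com 3 "status" rfl).1 hg)
    subst hb
    clear hsat hmin hle
    simp_all [coms, comsHelp, comsTable]
  by_cases h6 : PySem.Str.isIn "pwd" com = true
  · have hb : best = 5 := by
      have hlek := hmin 5 (by omega) ((comsGood_eq com 5 "pwd" rfl).2 h6)
      by_contra hne
      have hg := hsat (by omega)
      have hltk : best < 5 := by omega
      interval_cases best
      · exact h1 ((comsGood_eq com 0 "help" rfl).1 hg)
      · exact h2 ((comsGood_eq com 1 "?" rfl).1 hg)
      · exact h3 ((comsGood_eq com 2 "ls" rfl).1 hg)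
      · exact h4 ((comsGood_eq com 3 "status" rfl).1 hg)
      · exact h5 ((comsGood_eq com 4 "reboot" rfl).1 hg)
    subst hb
    clear hsat hmin hle
    simp_all [coms, comsHelp, comsTable]
  by_cases h7 : PySem.Str.isIn "whoami" com = true
  · have hb : best = 6 := by
      have hlek := hmin 6 (by omega) ((comsGood_eq com 6 "whoami" rfl).2 h7)
      by_contra hne
      have hg := hsat (by omega)
      have hltk : best < 6 := by omega
      interval_cases best
      · exact h1 ((comsGood_eq com 0 "help" rfl).1 hg)
      · exact h2 ((comsGood_eq com 1 "?" rfl).1 hg)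
      · exact h3 ((comsGood_eq com 2 "ls" rfl).1 hg)
      · exact h4 ((comsGood_eq com 3 "status" rfl).1 hg)
      · exact h5 ((comsGood_eq com 4 "reboot" rfl).1 hg)
      · exact h6 ((comsGood_eq com 5 "pwd" rfl).1 hg)
    subst hb
    clear hsat hmin hle
    simp_all [coms, comsHelp, comsTable]
  by_cases h8 : PySem.Str.isIn "ping" com = true
  · have hb : best = 7 := by
      have hlek := hmin 7 (by omega) ((comsGood_eq com 7 "ping" rfl).2 h8)
      by_contra hne
      have hg := hsat (by omega)
      have hltk : best < 7 := by omega
      interval_cases best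
      · exact h1 ((comsGood_eq com 0 "help" rfl).1 hg)
      · exact h2 ((comsGood_eq com 1 "?" rfl).1 hg)
      · exact h3 ((comsGood_eq com 2 "ls" rfl).1 hg)
      · exact h4 ((comsGood_eq com 3 "status" rfl).1 hg)
      · exact h5 ((comsGood_eq com 4 "reboot" rfl).1 hg)
      · exact h6 ((comsGood_eq com 5 "pwd" rfl).1 hg)
      · exact h7 ((comsGood_eq com 6 "whoami" rfl).1 hg)
    subst hb
    clear hsat hmin hle
    simp_all [coms, comsHelp, comsTable]
  by_cases h9 : PySem.Str.isIn "cd" com = true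
  · have hb : best = 8 := by
      have hlek := hmin 8 (by omega) ((comsGood_eq com 8 "cd" rfl).2 h9)
      by_contra hne
      have hg := hsat (by omega)
      have hltk : best < 8 := by omega
      interval_cases best
      · exact h1 ((comsGood_eq com 0 "help" rfl).1 hg)
      · exact h2 ((comsGood_eq com 1 "?" rfl).1 hg)
      · exact h3 ((comsGood_eq com 2 "ls" rfl).1 hg)
      · exact h4 ((comsGood_eq com 3 "status" rfl).1 hg)
      · exact h5 ((comsGood_eq com 4 "reboot" rfl).1 hg)
      · exact h6 ((comsGood_eq com 5 "pwd" rfl).1 hg)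
      · exact h7 ((comsGood_eq com 6 "whoami" rfl).1 hg)
      · exact h8 ((comsGood_eq com 7 "ping" rfl).1 hg)
    subst hb
    clear hsat hmin hle
    simp_all [coms, comsHelp, comsTable]
  by_cases h10 : PySem.Str.isIn "passwd" com = true
  · have hb : best = 9 := by
      have hlek := hmin 9 (by omega) ((comsGood_eq com 9 "passwd" rfl).2 h10)
      by_contra hne
      have hg := hsat (by omega)
      have hltk : best < 9 := by omega
      interval_cases best
      · exact h1 ((comsGood_eq com 0 "help" rfl).1 hg)
      · exact h2 ((comsGood_eq com 1 "?" rfl).1 hg)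
      · exact h3 ((comsGood_eq com 2 "ls" rfl).1 hg)
      · exact h4 ((comsGood_eq com 3 "status" rfl).1 hg)
      · exact h5 ((comsGood_eq com 4 "reboot" rfl).1 hg)
      · exact h6 ((comsGood_eq com 5 "pwd" rfl).1 hg)
      · exact h7 ((comsGood_eq com 6 "whoami" rfl).1 hg)
      · exact h8 ((comsGood_eq com 7 "ping" rfl).1 hg)
      · exact h9 ((comsGood_eq com 8 "cd" rfl).1 hg)
    subst hb
    clear hsat hmin hle
    simp_all [coms, comsHelp, comsTable]
  by_cases h11 : PySem.Str.isIn "version" com = true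
  · have hb : best = 10 := by
      have hlek := hmin 10 (by omega) ((comsGood_eq com 10 "version" rfl).2 h11)
      by_contra hne
      have hg := hsat (by omega)
      have hltk : best < 10 := by omega
      interval_cases best
      · exact h1 ((comsGood_eq com 0 "help" rfl).1 hg)
      · exact h2 ((comsGood_eq com 1 "?" rfl).1 hg)
      · exact h3 ((comsGood_eq com 2 "ls" rfl).1 hg)
      · exact h4 ((comsGood_eq com 3 "status" rfl).1 hg)
      · exact h5 ((comsGood_eq com 4 "reboot" rfl).1 hg)
      · exact h6 ((comsGood_eq com 5 "pwd" rfl).1 hg)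
      · exact h7 ((comsGood_eq com 6 "whoami" rfl).1 hg)
      · exact h8 ((comsGood_eq com 7 "ping" rfl).1 hg)
      · exact h9 ((comsGood_eq com 8 "cd" rfl).1 hg)
      · exact h10 ((comsGood_eq com 9 "passwd" rfl).1 hg)
    subst hb
    clear hsat hmin hle
    simp_all [coms, comsHelp, comsTable]
  by_cases h12 : PySem.Str.isIn "exit" com = true
  · have hb : best = 11 := by
      have hlek := hmin 11 (by omega) ((comsGood_eq com 11 "exit" rfl).2 h12)
      by_contra hne
      have hg := hsat (by omega)
      have hltk : best < 11 := by omega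
      interval_cases best
      · exact h1 ((comsGood_eq com 0 "help" rfl).1 hg)
      · exact h2 ((comsGood_eq com 1 "?" rfl).1 hg)
      · exact h3 ((comsGood_eq com 2 "ls" rfl).1 hg)
      · exact h4 ((comsGood_eq com 3 "status" rfl).1 hg)
      · exact h5 ((comsGood_eq com 4 "reboot" rfl).1 hg)
      · exact h6 ((comsGood_eq com 5 "pwd" rfl).1 hg)
      · exact h7 ((comsGood_eq com 6 "whoami" rfl).1 hg)
      · exact h8 ((comsGood_eq com 7 "ping" rfl).1 hg)
      · exact h9 ((comsGood_eq com 8 "cd" rfl).1 hg)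
      · exact h10 ((comsGood_eq com 9 "passwd" rfl).1 hg)
      · exact h11 ((comsGood_eq com 10 "version" rfl).1 hg)
    subst hb
    clear hsat hmin hle
    simp_all [coms, comsHelp, comsTable]
  have hb : best = 12 := by
    by_contra hne
    have hg := hsat (by omega)
    have hltk : best < 12 := by omega
    interval_cases best
    · exact h1 ((comsGood_eq com 0 "help" rfl).1 hg)
    · exact h2 ((comsGood_eq com 1 "?" rfl).1 hg)
    · exact h3 ((comsGood_eq com 2 "ls" rfl).1 hg)
    · exact h4 ((comsGood_eq com 3 "status" rfl).1 hg)
    · exact h5 ((comsGood_eq com 4 "reboot" rfl).1 hg)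
    · exact h6 ((comsGood_eq com 5 "pwd" rfl).1 hg)
    · exact h7 ((comsGood_eq com 6 "whoami" rfl).1 hg)
    · exact h8 ((comsGood_eq com 7 "ping" rfl).1 hg)
    · exact h9 ((comsGood_eq com 8 "cd" rfl).1 hg)
    · exact h10 ((comsGood_eq com 9 "passwd" rfl).1 hg)
    · exact h11 ((comsGood_eq com 10 "version" rfl).1 hg)
    · exact h12 ((comsGood_eq com 11 "exit" rfl).1 hg)
  subst hb
  clear hsat hmin
  simp_all [coms]

-- ===== VERDICT (by name: the statement is the Claim_ definition above) =====
theorem coms_spec : Claim_equal_coms := by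
  intro com _
  unfold Spec_coms
  obtain ⟨hle, hsat, hmin⟩ := comsBest_spec com.toList
  rw [coms_eq_table com _ hle hsat hmin]
  rfl
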